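-- pv_equiv track=rewrite | github.com/bitten-socks/LottonumberDraw_BackEnd | app.py | get_group_pattern
-- ===== SOURCE A (Python) =====
-- def get_group_pattern(winning_numbers):
--     """
--     번호군 패턴을 생성합니다.
--     매핑:
--       1~10  -> 1
--       11~20 -> 2
--       21~30 -> 3
--       31~40 -> 4
--       41~45 -> 5
--     예: [1, 11, 20, 31, 32, 33] -> [1, 2, 2, 4, 4, 4]
--     """
--     pattern = []
--     for num in winning_numbers:
--         if 1 <= num <= 10:
--             pattern.append(1)
--         elif 11 <= num <= 20:
--             pattern.append(2)
--         elif 21 <= num <= 30: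
--             pattern.append(3)
--         elif 31 <= num <= 40:
--             pattern.append(4)
--         elif 41 <= num <= 45:
--             pattern.append(5)
--         else:
--             pattern.append(0)
--     return pattern
-- ===== SOURCE B (Python) =====
-- _BOUNDS = [10, 20, 30, 40]
--
-- def _bisect_left(a, x):
--     lo, hi = 0, len(a)
--     while lo < hi:
--         mid = (lo + hi) // 2
--         if a[mid] < x:
--             lo = mid + 1
--         else:
--             hi = mid
--     return lo
--
-- def get_group_pattern(winning_numbers):
--     return [_bisect_left(_BOUNDS, num) + 1 if 1 <= num <= 45 else 0
--             for num in winning_numbers]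
-- ===== Notes on version B (the rewrite author's own statement) =====
-- stated objective: idiomatic
-- what changed: Replaces the five-branch if/elif chain with a single range guard plus a binary search over a precomputed boundary table, built as a list comprehension.
import Mathlib
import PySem

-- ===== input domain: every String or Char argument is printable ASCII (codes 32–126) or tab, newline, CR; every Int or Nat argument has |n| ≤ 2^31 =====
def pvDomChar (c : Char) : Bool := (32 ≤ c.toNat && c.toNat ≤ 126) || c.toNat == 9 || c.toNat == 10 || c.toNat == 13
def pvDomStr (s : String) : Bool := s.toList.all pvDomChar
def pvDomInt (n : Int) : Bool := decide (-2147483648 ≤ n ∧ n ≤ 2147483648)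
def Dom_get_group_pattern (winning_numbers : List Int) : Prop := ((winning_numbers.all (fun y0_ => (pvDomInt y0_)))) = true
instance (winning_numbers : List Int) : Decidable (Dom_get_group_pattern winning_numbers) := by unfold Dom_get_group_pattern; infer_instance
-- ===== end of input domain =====

-- B replaces A's if/elif chain with a range guard + binary search over a boundary table; same O(n), more idiomatic.

-- ===== PORT A =====
def get_group_pattern (winning_numbers : List Int) : List Int :=
  winning_numbers.foldl (fun pattern num =>
    if 1 ≤ num ∧ num ≤ 10 then pattern ++ [1]
    else if 11 ≤ num ∧ num ≤ 20 then pattern ++ [2]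
    else if 21 ≤ num ∧ num ≤ 30 then pattern ++ [3]
    else if 31 ≤ num ∧ num ≤ 40 then pattern ++ [4]
    else if 41 ≤ num ∧ num ≤ 45 then pattern ++ [5]
    else pattern ++ [0]) []

-- ===== PORT B =====
-- transliteration of Source B's _bisect_left while-loop (lo, hi as state; hi - lo decreases)
def bisectLeftLoop (a : List Int) (x : Int) (lo hi : Nat) : Nat :=
  if lo < hi then
    let mid := (lo + hi) / 2
    if a.getD mid 0 < x then bisectLeftLoop a x (mid + 1) hi
    else bisectLeftLoop a x lo mid
  else lo
termination_by hi - lo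
decreasing_by all_goals omega

def bisectLeft (a : List Int) (x : Int) : Nat := bisectLeftLoop a x 0 a.length

def pvBounds : List Int := [10, 20, 30, 40]

def get_group_pattern_alt (winning_numbers : List Int) : List Int :=
  winning_numbers.map (fun num =>
    if 1 ≤ num ∧ num ≤ 45 then (bisectLeft pvBounds num : Int) + 1 else 0)

-- ===== PRECONDITION & SPEC =====
def Spec_get_group_pattern (winning_numbers : List Int) (out : List Int) : Prop := out = get_group_pattern_alt winning_numbers
instance (winning_numbers : List Int) (out : List Int) : Decidable (Spec_get_group_pattern winning_numbers out) := by unfold Spec_get_group_pattern; infer_instance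

-- ===== CLAIM (what is proved, stated in full; the proofs are below) =====
def Claim_equal_get_group_pattern : Prop := ∀ (winning_numbers : List Int), Dom_get_group_pattern winning_numbers → Spec_get_group_pattern winning_numbers (get_group_pattern winning_numbers)

-- ===== LEMMAS AND PROOFS =====

lemma loop_self (a : List Int) (x : Int) (lo : Nat) : bisectLeftLoop a x lo lo = lo := by
  rw [bisectLeftLoop.eq_def]; simp

-- closed evaluation of the binary search on the concrete boundary table
lemma bisectLeft_bounds (x : Int) :
    bisectLeft pvBounds x =
      if x ≤ 10 then 0 else if x ≤ 20 then 1 else if x ≤ 30 then 2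
      else if x ≤ 40 then 3 else 4 := by
  unfold bisectLeft pvBounds
  rw [bisectLeftLoop.eq_def]; norm_num
  split_ifs with h1
  all_goals try (rw [bisectLeftLoop.eq_def]; (try norm_num); (try simp only [loop_self]); (try split_ifs) <;> try omega)
  all_goals try (rw [bisectLeftLoop.eq_def]; (try norm_num); (try simp only [loop_self]); (try split_ifs) <;> try omega)

lemma elt_eq (x : Int) :
    (if 1 ≤ x ∧ x ≤ 10 then (1 : Int)
     else if 11 ≤ x ∧ x ≤ 20 then 2
     else if 21 ≤ x ∧ x ≤ 30 then 3
     else if 31 ≤ x ∧ x ≤ 40 then 4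
     else if 41 ≤ x ∧ x ≤ 45 then 5
     else 0) =
    (if 1 ≤ x ∧ x ≤ 45 then (bisectLeft pvBounds x : Int) + 1 else 0) := by
  rw [bisectLeft_bounds]
  split_ifs <;> simp_all <;> omega

lemma foldl_eq (winning_numbers acc : List Int) :
    winning_numbers.foldl (fun pattern num =>
      if 1 ≤ num ∧ num ≤ 10 then pattern ++ [1]
      else if 11 ≤ num ∧ num ≤ 20 then pattern ++ [2]
      else if 21 ≤ num ∧ num ≤ 30 then pattern ++ [3]
      else if 31 ≤ num ∧ num ≤ 40 then pattern ++ [4]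
      else if 41 ≤ num ∧ num ≤ 45 then pattern ++ [5]
      else pattern ++ [0]) acc
    = acc ++ get_group_pattern_alt winning_numbers := by
  induction winning_numbers generalizing acc with
  | nil => simp [get_group_pattern_alt]
  | cons h t ih =>
    simp only [List.foldl_cons, get_group_pattern_alt, List.map_cons]
    have hb : (if 1 ≤ h ∧ h ≤ 10 then acc ++ [(1:Int)]
        else if 11 ≤ h ∧ h ≤ 20 then acc ++ [2]
        else if 21 ≤ h ∧ h ≤ 30 then acc ++ [3]
        else if 31 ≤ h ∧ h ≤ 40 then acc ++ [4]
        else if 41 ≤ h ∧ h ≤ 45 then acc ++ [5]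
        else acc ++ [0])
        = acc ++ [if 1 ≤ h ∧ h ≤ 45 then (bisectLeft pvBounds h : Int) + 1 else 0] := by
      rw [← elt_eq h]; split_ifs <;> rfl
    rw [hb, ih]
    simp [get_group_pattern_alt]

-- ===== VERDICT (by name: the statement is the Claim_ definition above) =====
theorem get_group_pattern_spec : Claim_equal_get_group_pattern := by
  intro wn _
  unfold Spec_get_group_pattern get_group_pattern
  simpa using foldl_eq wn []
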